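-- pv_equiv track=rewrite | github.com/wyk18703232953/myResearch | codeComplex/data copy/filteredData/python/linear/python_linear_0830.py | run_single_case
-- ===== SOURCE A (Python) =====
-- def solve(d, n, k):
--     mv = sum(d[0:k])
--     v = mv
--     for i in range(1, n - k + 1):
--         mv = mv + d[i + k - 1] - d[i - 1]
--         v = min(v, mv)
--     return v
--
-- def run_single_case(n, k, s):
--     st = 'RGB' * (n // 3 + 3)
--     diff1 = [0 for _ in range(n)]
--     diff2 = [0 for _ in range(n)]
--     diff3 = [0 for _ in range(n)]
--
--     for i in range(n):
--         if s[i] != st[i]: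
--             diff1[i] = 1
--         if s[i] != st[i + 1]:
--             diff2[i] = 1
--         if s[i] != st[i + 2]:
--             diff3[i] = 1
--
--     return min(solve(diff1, n, k), solve(diff2, n, k), solve(diff3, n, k))
-- ===== SOURCE B (Python) =====
-- def run_single_case(n, k, s):
--     pat = 'RGB'
--     m = max(n, 0)
--
--     def phase_best(p):
--         P = [0]
--         t = 0
--         for i in range(n):
--             t += 1 if s[i] != pat[(i + p) % 3] else 0
--             P.append(t)
--         # cost of window start j = mismatches at positions of [j, j+k) clipped to [0, m)
--         return min(P[max(0, min(j + k, m))] - P[j] for j in range(max(n - k, 0) + 1))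
--
--     return min(phase_best(0), phase_best(1), phase_best(2))
-- ===== Notes on version B (the rewrite author's own statement) =====
-- stated objective: alternative
-- what changed: A precomputes three 0/1 difference arrays against a pre-built repeated 'RGB' string and slides a window accumulator (mv += d[i+k-1]-d[i-1]) keeping a running min; B instead, per phase, builds one prefix-sum table of mismatch indicators computed by index arithmetic (i+p)%3 and takes the min of the constant-time clipped window reads P[min(j+k,n)]-P[j].
import Mathlib
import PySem

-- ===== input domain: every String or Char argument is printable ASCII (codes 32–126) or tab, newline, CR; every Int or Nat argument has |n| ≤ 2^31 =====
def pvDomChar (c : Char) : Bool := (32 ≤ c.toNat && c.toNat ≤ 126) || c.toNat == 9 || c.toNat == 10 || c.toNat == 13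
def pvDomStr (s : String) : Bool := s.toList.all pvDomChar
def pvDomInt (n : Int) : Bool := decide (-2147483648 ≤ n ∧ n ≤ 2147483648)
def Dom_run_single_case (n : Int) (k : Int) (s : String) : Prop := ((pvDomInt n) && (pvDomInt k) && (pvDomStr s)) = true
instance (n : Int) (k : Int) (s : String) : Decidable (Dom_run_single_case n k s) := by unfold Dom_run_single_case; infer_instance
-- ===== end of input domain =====

-- B replaces A's three pre-built 0/1 difference arrays + incremental sliding-window accumulator by, per phase,
-- one prefix-sum table with each window cost read off as P[j+k]-P[j]; alternative decomposition, same O(n) cost.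

-- ===== PORT A =====
def rgbPat : List Char := ['R', 'G', 'B']   -- the literal 'RGB'

-- helper 'solve' from A: sliding-window minimum over windows of length k
def pySolve (d : List Int) (n k : Int) : Int :=
  let mv0 := (PySem.List.slice d (some 0) (some k)).sum
  let r := (PySem.List.pyRange 1 (n - k + 1)).foldl
    (fun (st : Int × Int) i =>
      let mv := st.1 + PySem.List.pyGetD d (i + k - 1) 0 - PySem.List.pyGetD d (i - 1) 0
      (mv, min st.2 mv)) (mv0, mv0)
  r.2

def run_single_case (n : Int) (k : Int) (s : String) : Int :=
  let st := PySem.List.pyRepeat rgbPat (PySem.Int.floordiv n 3 + 3)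
  let diff1 := (PySem.List.pyRange 0 n).map (fun i => if PySem.List.pyGet? s.toList i ≠ PySem.List.pyGet? st i then (1:Int) else 0)
  let diff2 := (PySem.List.pyRange 0 n).map (fun i => if PySem.List.pyGet? s.toList i ≠ PySem.List.pyGet? st (i + 1) then (1:Int) else 0)
  let diff3 := (PySem.List.pyRange 0 n).map (fun i => if PySem.List.pyGet? s.toList i ≠ PySem.List.pyGet? st (i + 2) then (1:Int) else 0)
  min (min (pySolve diff1 n k) (pySolve diff2 n k)) (pySolve diff3 n k)

-- ===== PORT B =====
-- helper 'phase_best' from B: prefix sums P of the phase-p mismatch indicators, then min over clipped window reads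
-- (m = max(n, 0) is inlined; list indices are in range under Pre_, so pyGetD's default is never read there)
def phaseBest (n k : Int) (s : String) (p : Int) : Int :=
  let Pt := (PySem.List.pyRange 0 n).foldl
    (fun (st : List Int × Int) i =>
      (st.1 ++ [st.2 + (if PySem.List.pyGet? s.toList i ≠ PySem.List.pyGet? rgbPat (PySem.Int.mod (i + p) 3) then (1:Int) else 0)],
       st.2 + (if PySem.List.pyGet? s.toList i ≠ PySem.List.pyGet? rgbPat (PySem.Int.mod (i + p) 3) then (1:Int) else 0))) ([0], 0)
  ((PySem.List.min? ((PySem.List.pyRange 0 (max (n - k) 0 + 1)).map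
      (fun j => PySem.List.pyGetD Pt.1 (max 0 (min (j + k) (max n 0))) 0 - PySem.List.pyGetD Pt.1 j 0)) (fun x => x)).getD 0)

def run_single_case_alt (n : Int) (k : Int) (s : String) : Int :=
  min (min (phaseBest n k s 0) (phaseBest n k s 1)) (phaseBest n k s 2)

-- ===== PRECONDITION & SPEC =====
-- Pre_ is exactly where A returns normally: A raises IndexError iff 1 ≤ n and n > len(s) (reading s[i]),
-- or k < 0 and k < n (the loop then walks d's indices off the end).
def Pre_run_single_case (n : Int) (k : Int) (s : String) : Prop :=
  (1 ≤ n → n ≤ (s.toList.length : Int)) ∧ (0 ≤ k ∨ n ≤ k)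
instance (n : Int) (k : Int) (s : String) : Decidable (Pre_run_single_case n k s) := by unfold Pre_run_single_case; infer_instance
def pvWitness_run_single_case : Int × Int × String := (3, 2, "RGG")

def Spec_run_single_case (n : Int) (k : Int) (s : String) (out : Int) : Prop := out = run_single_case_alt n k s
instance (n : Int) (k : Int) (s : String) (out : Int) : Decidable (Spec_run_single_case n k s out) := by unfold Spec_run_single_case; infer_instance

-- ===== CLAIM (what is proved, stated in full; the proofs are below) =====
def Claim_equal_run_single_case : Prop := ∀ (n : Int) (k : Int) (s : String), Dom_run_single_case n k s → Pre_run_single_case n k s → Spec_run_single_case n k s (run_single_case n k s)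

-- ===== LEMMAS AND PROOFS =====

-- the phase-p mismatch indicator at position i (the common quantity both programs count)
def mism (s : String) (p i : Int) : Int :=
  if PySem.List.pyGet? s.toList i ≠ PySem.List.pyGet? rgbPat (PySem.Int.mod (i + p) 3) then 1 else 0

-- prefix sum of the indicators over [0, j)
def PS (s : String) (p j : Int) : Int := ((PySem.List.pyRange 0 j).map (mism s p)).sum

-- cost of the window [j, j+k)
def Wc (s : String) (p k j : Int) : Int := PS s p (j + k) - PS s p j

-- the value both programs compute per phase: running min of window costs, seeded with window 0
def common (s : String) (p n k : Int) : Int :=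
  ((PySem.List.pyRange 1 (n - k + 1)).map (Wc s p k)).foldl min (Wc s p k 0)

lemma PS_zero (s : String) (p : Int) : PS s p 0 = 0 := by
  simp [PS, PySem.List.pyRange_one_eq_nil (le_refl 0)]

lemma PS_succ (s : String) (p : Int) {j : Int} (hj : 0 ≤ j) :
    PS s p (j + 1) = PS s p j + mism s p j := by
  unfold PS
  rw [PySem.List.pyRange_one_succ_right hj]
  simp

lemma Wc_succ (s : String) (p : Int) {k j : Int} (hk : 0 ≤ k) (hj : 0 ≤ j) :
    Wc s p k (j + 1) = Wc s p k j + mism s p (j + k) - mism s p j := by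
  unfold Wc
  rw [show j + 1 + k = (j + k) + 1 by ring, PS_succ s p (by omega), PS_succ s p hj]
  ring

-- indexing into the repeated pattern reads the pattern cyclically (Nat level)
lemma repFlat_get (r t : Nat) (ht : t < 3 * r) :
    (List.flatten (List.replicate r rgbPat))[t]? = rgbPat[t % 3]? := by
  induction r generalizing t with
  | zero => omega
  | succ r ih =>
    rw [List.replicate_succ, List.flatten_cons]
    by_cases h3 : t < 3
    · rw [List.getElem?_append_left (by simp [rgbPat]; omega)]
      congr 1
      omega
    · rw [List.getElem?_append_right (by simp [rgbPat]; omega)]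
      have hlen : (t - List.length rgbPat) = t - 3 := by simp [rgbPat]
      rw [hlen, ih (t - 3) (by omega)]
      congr 1
      omega

-- indexing into A's st string = pattern at index mod 3
lemma repGet (m t : Int) (ht : 0 ≤ t) (hm : t < 3 * m) :
    PySem.List.pyGet? (PySem.List.pyRepeat rgbPat m) t = PySem.List.pyGet? rgbPat (PySem.Int.mod t 3) := by
  have hrep : PySem.List.pyRepeat rgbPat m = List.flatten (List.replicate m.toNat rgbPat) := by
    simp [PySem.List.pyRepeat]
  obtain ⟨tn, rfl⟩ : ∃ tn : Nat, t = (tn : Int) := ⟨t.toNat, (Int.toNat_of_nonneg ht).symm⟩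
  rw [hrep, PySem.List.pyGet?_natCast, show ((3:Int)) = ((3:Nat) : Int) from rfl,
    PySem.Int.mod_natCast, PySem.List.pyGet?_natCast]
  exact repFlat_get m.toNat tn (by omega)

-- A's per-position indicator for phase p is mism
lemma ind_eq_mism (s : String) (n p i : Int) (hp : 0 ≤ p) (hp2 : p ≤ 2) (hi : 0 ≤ i) (hin : i < n) :
    (if PySem.List.pyGet? s.toList i ≠
        PySem.List.pyGet? (PySem.List.pyRepeat rgbPat (PySem.Int.floordiv n 3 + 3)) (i + p)
      then (1:Int) else 0) = mism s p i := by
  have hmodlt := PySem.Int.mod_lt n (b := 3) (by omega)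
  have hmodnn := PySem.Int.mod_nonneg n (b := 3) (by omega)
  have hdm := PySem.Int.floordiv_mul_add_mod n 3
  rw [repGet (PySem.Int.floordiv n 3 + 3) (i + p) (by omega) (by omega), mism]

-- A's sliding-window solve equals the running min of window costs
lemma solveA (s : String) (p n k : Int) (hk : 0 ≤ k) (hkn : k ≤ n) :
    pySolve ((PySem.List.pyRange 0 n).map (mism s p)) n k = common s p n k := by
  have hmv0 : (PySem.List.slice ((PySem.List.pyRange 0 n).map (mism s p)) (some 0) (some k)).sum
      = Wc s p k 0 := by
    rw [PySem.List.slice_zero_start, PySem.List.slice_to _ hk]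
    have htake : ((PySem.List.pyRange 0 n).map (mism s p)).take k.toNat
        = (PySem.List.pyRange 0 k).map (mism s p) := by
      rw [PySem.List.pyRange_one 0 n, ← List.map_take, ← List.map_take, List.take_range,
        show min k.toNat (n - 0).toNat = (k - 0).toNat by omega, ← PySem.List.pyRange_one 0 k]
    rw [htake, Wc, PS_zero]
    simp [PS]
  have key : ∀ m : Nat, (m : Int) ≤ n - k →
      (PySem.List.pyRange 1 ((m : Int) + 1)).foldl
        (fun (st : Int × Int) i =>
          (st.1 + PySem.List.pyGetD ((PySem.List.pyRange 0 n).map (mism s p)) (i + k - 1) 0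
            - PySem.List.pyGetD ((PySem.List.pyRange 0 n).map (mism s p)) (i - 1) 0,
           min st.2 (st.1 + PySem.List.pyGetD ((PySem.List.pyRange 0 n).map (mism s p)) (i + k - 1) 0
            - PySem.List.pyGetD ((PySem.List.pyRange 0 n).map (mism s p)) (i - 1) 0)))
        (Wc s p k 0, Wc s p k 0)
      = (Wc s p k m, ((PySem.List.pyRange 1 ((m : Int) + 1)).map (Wc s p k)).foldl min (Wc s p k 0)) := by
    intro m
    induction m with
    | zero => intro _; simp [PySem.List.pyRange_one_eq_nil (le_refl 1)]
    | succ m ih =>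
      intro hm
      push_cast at hm ⊢
      rw [PySem.List.pyRange_one_succ_right (by omega : (1:Int) ≤ (m : Int) + 1),
        List.foldl_append, List.map_append, List.foldl_append, ih (by omega)]
      have h1 : PySem.List.pyGetD ((PySem.List.pyRange 0 n).map (mism s p)) ((m : Int) + 1 + k - 1) 0
          = mism s p ((m : Int) + k) := by
        rw [show (m : Int) + 1 + k - 1 = (m : Int) + k by ring]
        exact PySem.List.pyGetD_map_pyRange_of_nonneg _ n _ 0 (by omega) (by omega)
      have h2 : PySem.List.pyGetD ((PySem.List.pyRange 0 n).map (mism s p)) ((m : Int) + 1 - 1) 0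
          = mism s p (m : Int) := by
        rw [show (m : Int) + 1 - 1 = (m : Int) by ring]
        exact PySem.List.pyGetD_map_pyRange_of_nonneg _ n _ 0 (by omega) (by omega)
      simp only [List.foldl_cons, List.foldl_nil, List.map_cons, List.map_nil]
      rw [h1, h2, ← Wc_succ s p hk (by omega)]
  have hm : ((n - k).toNat : Int) = n - k := Int.toNat_of_nonneg (by omega)
  have hkey := key (n - k).toNat (by omega)
  rw [hm] at hkey
  unfold pySolve
  dsimp only
  rw [hmv0, show n - k + 1 = (n - k) + 1 by ring, hkey]
  rfl

-- B's prefix-sum loop builds exactly the table of PS values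
lemma foldB (s : String) (p : Int) : ∀ m : Nat,
    (PySem.List.pyRange 0 (m : Int)).foldl
      (fun (st : List Int × Int) i =>
        (st.1 ++ [st.2 + (if PySem.List.pyGet? s.toList i ≠ PySem.List.pyGet? rgbPat (PySem.Int.mod (i + p) 3) then (1:Int) else 0)],
         st.2 + (if PySem.List.pyGet? s.toList i ≠ PySem.List.pyGet? rgbPat (PySem.Int.mod (i + p) 3) then (1:Int) else 0))) ([0], 0)
    = ((PySem.List.pyRange 0 ((m : Int) + 1)).map (PS s p), PS s p m) := by
  intro m
  induction m with
  | zero =>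
    have h1 : PySem.List.pyRange 0 ((0:Int) + 1) = [0] := PySem.List.pyRange_one_singleton 0
    simp only [Nat.cast_zero]
    rw [PySem.List.pyRange_one_eq_nil (le_refl 0), h1]
    simp [PS_zero]
  | succ m ih =>
    push_cast
    rw [PySem.List.pyRange_one_succ_right (by omega : (0:Int) ≤ (m : Int)), List.foldl_append, ih]
    have ht : PS s p (m : Int) + (if PySem.List.pyGet? s.toList (m : Int) ≠ PySem.List.pyGet? rgbPat (PySem.Int.mod ((m : Int) + p) 3) then (1:Int) else 0)
        = PS s p ((m : Int) + 1) := by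
      rw [PS_succ s p (by omega)]; rfl
    simp only [List.foldl_cons, List.foldl_nil]
    rw [ht, PySem.List.pyRange_one_succ_right (by omega : (0:Int) ≤ (m : Int) + 1), List.map_append]
    simp

-- B's phase_best equals the running min of window costs
lemma phaseB (s : String) (p n k : Int) (hn : 0 ≤ n) (hk : 0 ≤ k) (hkn : k ≤ n) :
    phaseBest n k s p = common s p n k := by
  unfold phaseBest
  dsimp only
  have hmIn : ((n.toNat : Int)) = n := Int.toNat_of_nonneg hn
  have hPt := foldB s p n.toNat
  rw [hmIn] at hPt
  rw [hPt, show max (n - k) 0 = n - k by omega]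
  have hwin : (PySem.List.pyRange 0 (n - k + 1)).map
      (fun j => PySem.List.pyGetD ((PySem.List.pyRange 0 (n + 1)).map (PS s p)) (max 0 (min (j + k) (max n 0))) 0
        - PySem.List.pyGetD ((PySem.List.pyRange 0 (n + 1)).map (PS s p)) j 0)
      = (PySem.List.pyRange 0 (n - k + 1)).map (Wc s p k) := by
    apply List.map_congr_left
    intro j hj
    rw [PySem.List.mem_pyRange_one] at hj
    rw [show max 0 (min (j + k) (max n 0)) = j + k by omega,
      PySem.List.pyGetD_map_pyRange_of_nonneg _ _ _ 0 (by omega) (by omega),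
      PySem.List.pyGetD_map_pyRange_of_nonneg _ _ _ 0 (by omega) (by omega), Wc]
  simp only [hwin]
  rw [PySem.List.pyRange_one_cons (by omega : (0:Int) < n - k + 1), List.map_cons,
    PySem.List.min?_id_cons]
  rfl

-- with no window to slide (k > n), A's slice clamp makes solve return the whole-list sum
lemma solve_total (s : String) (p n k : Int) (hn : 0 ≤ n) (hk : n < k) :
    pySolve ((PySem.List.pyRange 0 n).map (mism s p)) n k = PS s p n := by
  unfold pySolve
  dsimp only
  rw [PySem.List.pyRange_one_eq_nil (by omega : n - k + 1 ≤ 1)]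
  simp only [List.foldl_nil]
  rw [PySem.List.slice_zero_start, PySem.List.slice_to _ (by omega),
    List.take_of_length_le (by rw [List.length_map, PySem.List.length_pyRange_one]; omega)]
  rfl

-- and B then reads the single clipped window [0, n)
lemma phase_total (s : String) (n k p : Int) (hn : 0 ≤ n) (hk : n < k) :
    phaseBest n k s p = PS s p n := by
  unfold phaseBest
  dsimp only
  have hmIn : ((n.toNat : Int)) = n := Int.toNat_of_nonneg hn
  have hPt := foldB s p n.toNat
  rw [hmIn] at hPt
  rw [hPt, show max (n - k) 0 + 1 = 0 + 1 by omega, PySem.List.pyRange_one_singleton,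
    List.map_cons, List.map_nil, show max 0 (min (0 + k) (max n 0)) = n by omega,
    PySem.List.pyGetD_map_pyRange_of_nonneg _ _ _ 0 (by omega) (by omega),
    PySem.List.pyGetD_map_pyRange_of_nonneg _ _ _ 0 (by omega) (by omega),
    PySem.List.min?_id_cons]
  simp [PS_zero]

-- n < 0: A's loops are all empty and solve returns an empty sum
lemma pySolve_nil (n k : Int) (h : n ≤ k) : pySolve [] n k = 0 := by
  unfold pySolve
  dsimp only
  rw [PySem.List.pyRange_one_eq_nil (by omega : n - k + 1 ≤ 1)]
  simp [PySem.List.slice]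

-- n < 0: B's table is [0] and the single clipped window is empty
lemma phaseBest_neg (n k : Int) (s : String) (p : Int) (hn : n < 0) (hk : n ≤ k) :
    phaseBest n k s p = 0 := by
  unfold phaseBest
  dsimp only
  rw [PySem.List.pyRange_one_eq_nil (by omega : n ≤ 0)]
  simp only [List.foldl_nil]
  rw [show max (n - k) 0 + 1 = 0 + 1 by omega, PySem.List.pyRange_one_singleton,
    List.map_cons, List.map_nil, show max 0 (min (0 + k) (max n 0)) = 0 by omega,
    PySem.List.min?_id_cons]
  simp [PySem.List.pyGetD_zero_cons]

-- ===== VERDICT (by name: the statement is the Claim_ definition above) =====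
theorem run_single_case_spec : Claim_equal_run_single_case := by
  intro n k s _ hPre
  obtain ⟨hlen, hk⟩ := hPre
  unfold Spec_run_single_case run_single_case run_single_case_alt
  dsimp only
  have e0 : (PySem.List.pyRange 0 n).map
      (fun i => if PySem.List.pyGet? s.toList i ≠
        PySem.List.pyGet? (PySem.List.pyRepeat rgbPat (PySem.Int.floordiv n 3 + 3)) i then (1:Int) else 0)
      = (PySem.List.pyRange 0 n).map (mism s 0) := by
    apply List.map_congr_left
    intro i hi
    rw [PySem.List.mem_pyRange_one] at hi
    have h := ind_eq_mism s n 0 i (by omega) (by omega) (by omega) (by omega)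
    rw [add_zero] at h
    exact h
  have e1 : (PySem.List.pyRange 0 n).map
      (fun i => if PySem.List.pyGet? s.toList i ≠
        PySem.List.pyGet? (PySem.List.pyRepeat rgbPat (PySem.Int.floordiv n 3 + 3)) (i + 1) then (1:Int) else 0)
      = (PySem.List.pyRange 0 n).map (mism s 1) := by
    apply List.map_congr_left
    intro i hi
    rw [PySem.List.mem_pyRange_one] at hi
    exact ind_eq_mism s n 1 i (by omega) (by omega) (by omega) (by omega)
  have e2 : (PySem.List.pyRange 0 n).map
      (fun i => if PySem.List.pyGet? s.toList i ≠
        PySem.List.pyGet? (PySem.List.pyRepeat rgbPat (PySem.Int.floordiv n 3 + 3)) (i + 2) then (1:Int) else 0)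
      = (PySem.List.pyRange 0 n).map (mism s 2) := by
    apply List.map_congr_left
    intro i hi
    rw [PySem.List.mem_pyRange_one] at hi
    exact ind_eq_mism s n 2 i (by omega) (by omega) (by omega) (by omega)
  have hcase : (0 ≤ k ∧ k ≤ n) ∨ (0 ≤ n ∧ n < k) ∨ (n < 0 ∧ n ≤ k) := by omega
  rcases hcase with ⟨ha, hb⟩ | ⟨ha, hb⟩ | ⟨ha, hb⟩
  · rw [e0, e1, e2, solveA s 0 n k ha hb, solveA s 1 n k ha hb, solveA s 2 n k ha hb,
      phaseB s 0 n k (by omega) ha hb, phaseB s 1 n k (by omega) ha hb,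
      phaseB s 2 n k (by omega) ha hb]
  · rw [e0, e1, e2, solve_total s 0 n k ha hb, solve_total s 1 n k ha hb, solve_total s 2 n k ha hb,
      phase_total s n k 0 ha hb, phase_total s n k 1 ha hb, phase_total s n k 2 ha hb]
  · rw [PySem.List.pyRange_one_eq_nil (by omega : n ≤ 0)]
    simp only [List.map_nil]
    rw [pySolve_nil n k hb, phaseBest_neg n k s 0 ha hb, phaseBest_neg n k s 1 ha hb,
      phaseBest_neg n k s 2 ha hb]
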